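-- pv_equiv track=rewrite | github.com/JamieTasker/md5crawler | md5crawler.py | get_dict_value_duplicates
-- ===== SOURCE A (Python) =====
-- def get_dict_value_duplicates(search_dict):
--
-- 	duplicates_dict = {}
-- 	vals = list(search_dict.values())
--
-- 	for key, value in search_dict.items():
-- 		if vals.count(value) > 1:
-- 			if value not in duplicates_dict:
-- 				duplicates_dict[value] = [key]
-- 			else:
-- 				duplicates_dict[value].append(key)
--
-- 	return duplicates_dict
-- ===== SOURCE B (Python) =====
-- def get_dict_value_duplicates(search_dict):
--     pairs = list(search_dict.items())
--     values = [v for _, v in pairs]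
--     distinct = list(dict.fromkeys(values))
--     return {v: [k for k, w in pairs if w == v]
--             for v in distinct if values.count(v) > 1}
-- ===== Notes on version B (the rewrite author's own statement) =====
-- stated objective: alternative
-- what changed: Instead of A's per-item loop that incrementally inserts/appends into the result dict, B enumerates the distinct values once (dict.fromkeys) and builds each duplicate group's full key list in one comprehension per distinct value.
import Mathlib
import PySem

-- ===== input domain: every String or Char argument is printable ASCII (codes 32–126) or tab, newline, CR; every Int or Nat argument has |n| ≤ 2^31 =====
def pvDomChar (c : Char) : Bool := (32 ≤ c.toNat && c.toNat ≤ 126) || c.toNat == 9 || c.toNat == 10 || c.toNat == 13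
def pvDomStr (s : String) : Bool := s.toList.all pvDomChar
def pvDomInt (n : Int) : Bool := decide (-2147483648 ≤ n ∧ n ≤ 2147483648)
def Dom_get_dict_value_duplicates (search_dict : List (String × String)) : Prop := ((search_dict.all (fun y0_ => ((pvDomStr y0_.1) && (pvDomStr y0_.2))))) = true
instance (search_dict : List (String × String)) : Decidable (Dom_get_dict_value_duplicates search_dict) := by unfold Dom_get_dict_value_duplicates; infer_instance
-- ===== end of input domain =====

-- B builds the result per distinct value (dedup, then one comprehension per group) instead of A's per-item insert/append loop (objective: alternative).

-- ===== PORT A =====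
-- literal transliteration: vals = values; loop over items, count-check, then insert-or-append
def get_dict_value_duplicates (search_dict : List (String × String)) : List (String × List String) :=
  let vals := search_dict.map (·.2)
  (search_dict.foldl (fun d (p : String × String) =>
      if vals.count p.2 > 1 then
        if d.contains p.2 = false then d.insert p.2 [p.1]
        else d.modify p.2 [] (· ++ [p.1])
      else d)
    (PySem.Dict.empty : PySem.Dict String (List String))).items

-- ===== PORT B =====
-- literal transliteration of Source B: pairs, values, distinct = list(dict.fromkeys(values)),
-- then the dict comprehension {v: [k for k, w in pairs if w == v] for v in distinct if values.count(v) > 1};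
-- distinct is duplicate-free, so the comprehension's dict is exactly this list of rows in that order
def get_dict_value_duplicates_alt (search_dict : List (String × String)) : List (String × List String) :=
  let pairs := search_dict
  let values := pairs.map (·.2)
  let distinct := PySem.List.dedup values
  (distinct.filter (fun v => values.count v > 1)).map
    (fun v => (v, (pairs.filter (fun p => p.2 == v)).map (·.1)))

-- ===== PRECONDITION & SPEC =====
def Spec_get_dict_value_duplicates (search_dict : List (String × String)) (out : List (String × List String)) : Prop := out = get_dict_value_duplicates_alt search_dict
instance (search_dict : List (String × String)) (out : List (String × List String)) : Decidable (Spec_get_dict_value_duplicates search_dict out) := by unfold Spec_get_dict_value_duplicates; infer_instance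

-- ===== CLAIM (what is proved, stated in full; the proofs are below) =====
def Claim_equal_get_dict_value_duplicates : Prop := ∀ (search_dict : List (String × String)), Dom_get_dict_value_duplicates search_dict → Spec_get_dict_value_duplicates search_dict (get_dict_value_duplicates search_dict)

-- ===== LEMMAS AND PROOFS =====

-- the group row for value v built from the pair list l
def pvRow (l : List (String × String)) (v : String) : String × List String :=
  (v, (l.filter (fun p => p.2 == v)).map (·.1))

-- A's loop body, with the count list c fixed (A computes vals before the loop)
def pvStepA (c : List String) (d : PySem.Dict String (List String)) (p : String × String) :
    PySem.Dict String (List String) :=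
  if c.count p.2 > 1 then
    if d.contains p.2 = false then d.insert p.2 [p.1]
    else d.modify p.2 [] (· ++ [p.1])
  else d

lemma pvStepA_skip (c : List String) (d : PySem.Dict String (List String))
    (p : String × String) (h : ¬ c.count p.2 > 1) : pvStepA c d p = d := by
  unfold pvStepA; rw [if_neg h]

lemma pvStepA_insert (c : List String) (d : PySem.Dict String (List String))
    (p : String × String) (h1 : c.count p.2 > 1) (h2 : d.contains p.2 = false) :
    pvStepA c d p = d.insert p.2 [p.1] := by
  unfold pvStepA; rw [if_pos h1, if_pos h2]

lemma pvStepA_append (c : List String) (d : PySem.Dict String (List String))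
    (p : String × String) (h1 : c.count p.2 > 1) (h2 : d.contains p.2 = true) :
    pvStepA c d p = d.insert p.2 (d.getD p.2 [] ++ [p.1]) := by
  unfold pvStepA
  rw [if_pos h1, if_neg (by simp [h2])]
  rfl

lemma pvRow_append_ne (l : List (String × String)) (p : String × String) (v : String)
    (h : v ≠ p.2) : pvRow (l ++ [p]) v = pvRow l v := by
  simp only [pvRow, List.filter_append]
  rw [show List.filter (fun q => q.2 == v) [p] = [] by
    simp only [List.filter_cons, List.filter_nil, beq_iff_eq]
    rw [if_neg (fun h' => h h'.symm)]]
  simp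

-- characterization of A's fold
lemma pvA_items (c : List String) (l : List (String × String)) :
    (l.foldl (pvStepA c) (PySem.Dict.empty : PySem.Dict String (List String))).items
      = ((PySem.Set.ofList (l.map (·.2))).filter (fun v => c.count v > 1)).map (pvRow l) := by
  induction l using List.reverseRecOn with
  | nil => rfl
  | append_singleton l p ih =>
    rw [List.foldl_append]
    obtain ⟨k, v⟩ := p
    simp only [List.foldl_cons, List.foldl_nil]
    have hkeys : (l.foldl (pvStepA c) PySem.Dict.empty).keys
        = (PySem.Set.ofList (l.map (·.2))).filter (fun v => c.count v > 1) := by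
      show ((l.foldl (pvStepA c) PySem.Dict.empty).items.map (·.1)) = _
      rw [ih, List.map_map]
      simp [Function.comp_def, pvRow]
    have hsets : PySem.Set.ofList ((l ++ [(k, v)]).map (·.2))
        = (PySem.Set.ofList (l.map (·.2))).add v := by
      rw [show (l ++ [(k, v)]).map (fun x => x.2) = l.map (fun x => x.2) ++ [v] by simp]
      exact PySem.Set.ofList_append_singleton _ _
    by_cases hc : c.count v > 1
    · by_cases hv : v ∈ l.map (·.2)
      · -- value seen before: add keeps the set; A takes the append branch
        have hvS : v ∈ PySem.Set.ofList (l.map (·.2)) := (PySem.Set.mem_ofList _ _).mpr hv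
        have hvF : v ∈ (PySem.Set.ofList (l.map (·.2))).filter (fun v => c.count v > 1) :=
          List.mem_filter.mpr ⟨hvS, by simpa using hc⟩
        have hcont : (l.foldl (pvStepA c) PySem.Dict.empty).contains v = true := by
          rw [PySem.Dict.contains_eq_decide_mem_keys, hkeys]
          exact decide_eq_true hvF
        have hadd : (PySem.Set.ofList (l.map (·.2))).add v = PySem.Set.ofList (l.map (·.2)) := by
          have hct : (PySem.Set.ofList (l.map (·.2))).contains v = true := by
            simpa [PySem.Set.contains] using hvS
          unfold PySem.Set.add
          rw [hct]
          simp
        have hnodup : (l.foldl (pvStepA c) PySem.Dict.empty).keys.Nodup := by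
          rw [hkeys]; exact (PySem.Set.nodup_ofList _).filter _
        have hmem : (v, (l.filter (fun q => q.2 == v)).map (·.1))
            ∈ (l.foldl (pvStepA c) PySem.Dict.empty).items := by
          rw [ih]
          refine List.mem_map.mpr ⟨v, hvF, ?_⟩
          rfl
        have hgetD : (l.foldl (pvStepA c) PySem.Dict.empty).getD v []
            = (l.filter (fun q => q.2 == v)).map (·.1) :=
          PySem.Dict.getD_of_mem_items _ hmem hnodup []
        rw [pvStepA_append c _ (k, v) hc hcont]
        rw [PySem.Dict.items_insert_of_contains _ _ hcont, ih, hgetD, hsets, hadd,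
          List.map_map]
        apply List.map_congr_left
        intro v' _
        by_cases hv' : v' = v
        · subst hv'
          simp [pvRow, List.filter_append]
        · have hne : ((pvRow l v').1 == v) = false := by
            show (v' == v) = false
            exact beq_eq_false_iff_ne.mpr hv'
          simp only [Function.comp_apply, hne, Bool.false_eq_true, if_false]
          exact (pvRow_append_ne l (k, v) v' hv').symm
      · -- fresh value with count > 1: insert appends
        have hvS : v ∉ PySem.Set.ofList (l.map (·.2)) := fun h => hv ((PySem.Set.mem_ofList _ _).mp h)
        have hcont : (l.foldl (pvStepA c) PySem.Dict.empty).contains v = false := by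
          rw [PySem.Dict.contains_eq_decide_mem_keys, hkeys]
          simp only [decide_eq_false_iff_not]
          exact fun h => hvS (List.mem_filter.mp h).1
        have hadd : (PySem.Set.ofList (l.map (·.2))).add v
            = PySem.Set.ofList (l.map (·.2)) ++ [v] := by
          have hcf : (PySem.Set.ofList (l.map (·.2))).contains v = false := by
            simpa [PySem.Set.contains] using hvS
          unfold PySem.Set.add
          rw [hcf]
          simp
        have hfilterl : l.filter (fun q => q.2 == v) = [] := by
          rw [List.filter_eq_nil_iff]
          intro q hq
          simp only [beq_iff_eq]
          exact fun h => hv (List.mem_map.mpr ⟨q, hq, h⟩)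
        rw [pvStepA_insert c _ (k, v) hc hcont]
        rw [PySem.Dict.items_insert_of_not_contains _ _ hcont, ih, hsets, hadd,
          List.filter_append]
        rw [show List.filter (fun v => c.count v > 1) [v] = [v] by simp [hc]]
        rw [List.map_append]
        congr 1
        · apply List.map_congr_left
          intro v' hv'
          have : v' ≠ v := fun h => hvS (h ▸ (List.mem_filter.mp hv').1)
          exact (pvRow_append_ne l (k, v) v' this).symm
        · simp [pvRow, List.filter_append, hfilterl]
    · -- count ≤ 1: A skips; the filtered set is unchanged
      rw [pvStepA_skip c _ (k, v) hc, ih, hsets]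
      have hfe : ((PySem.Set.ofList (l.map (·.2))).add v).filter (fun v => c.count v > 1)
          = (PySem.Set.ofList (l.map (·.2))).filter (fun v => c.count v > 1) := by
        unfold PySem.Set.add
        by_cases hv : (PySem.Set.ofList (l.map (·.2))).contains v = true
        · rw [if_pos hv]
        · rw [if_neg hv, List.filter_append]
          simp [hc]
      rw [hfe]
      apply List.map_congr_left
      intro v' hv'
      have hpred : c.count v' > 1 := by simpa using (List.mem_filter.mp hv').2
      have : v' ≠ v := fun h => hc (h ▸ hpred)
      exact (pvRow_append_ne l (k, v) v' this).symm

lemma pv_final (xs : List (String × String)) :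
    get_dict_value_duplicates xs = get_dict_value_duplicates_alt xs := by
  show (xs.foldl (pvStepA (xs.map (·.2))) (PySem.Dict.empty : PySem.Dict String (List String))).items
      = ((PySem.List.dedup (xs.map (·.2))).filter (fun v => (xs.map (·.2)).count v > 1)).map
          (fun v => (v, (xs.filter (fun p => p.2 == v)).map (·.1)))
  rw [pvA_items, PySem.List.dedup_eq_ofList]
  rfl

-- ===== VERDICT (by name: the statement is the Claim_ definition above) =====
theorem get_dict_value_duplicates_spec : Claim_equal_get_dict_value_duplicates := by
  intro xs _
  exact pv_final xs
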